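-- pv_equiv track=rewrite | github.com/xiaodream551-a11y/AI-Smart-Build | AISmartBuild.extension/lib/ai/replay.py | _infer_single_failed_action
-- ===== SOURCE A (Python) =====
-- def _infer_single_failed_action(entries):
--     actions = set([
--         (entry.get("action") or "unknown")
--         for entry in (entries or [])
--     ])
--     if len(actions) == 1:
--         return list(actions)[0]
--     return None
-- ===== SOURCE B (Python) =====
-- def _infer_single_failed_action(entries):
--     candidate = None
--     for entry in (entries or []):
--         act = entry.get("action") or "unknown"
--         if candidate is None:
--             candidate = act
--         elif act != candidate:
--             return None
--     return candidate
-- ===== Notes on version B (the rewrite author's own statement) =====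
-- stated objective: simpler
-- what changed: Instead of materialising the set of distinct actions and testing its size, B does one pass keeping a single candidate action and returns None immediately on the first mismatch (early exit), never building a set.
import Mathlib
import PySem

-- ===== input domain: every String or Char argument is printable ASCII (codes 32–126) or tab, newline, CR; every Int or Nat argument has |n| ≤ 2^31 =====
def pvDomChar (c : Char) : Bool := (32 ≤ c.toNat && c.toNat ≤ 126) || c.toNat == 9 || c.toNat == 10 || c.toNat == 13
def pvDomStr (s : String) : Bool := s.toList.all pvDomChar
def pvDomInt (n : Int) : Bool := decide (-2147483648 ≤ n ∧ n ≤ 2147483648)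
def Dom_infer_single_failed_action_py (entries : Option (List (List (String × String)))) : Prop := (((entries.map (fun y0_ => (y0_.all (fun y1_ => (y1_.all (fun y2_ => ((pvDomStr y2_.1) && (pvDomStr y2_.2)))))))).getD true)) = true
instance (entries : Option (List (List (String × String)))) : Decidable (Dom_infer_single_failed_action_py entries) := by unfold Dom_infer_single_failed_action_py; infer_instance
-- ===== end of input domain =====

-- B replaces A's set-of-distinct-actions with a one-pass scan keeping a single candidate and an early exit (simpler, O(1) extra space).


-- shared helper: entry.get("action") or "unknown"  (Python 'or' replaces both a missing key and "")
def pvAct (entry : List (String × String)) : String :=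
  match PySem.Dict.get? (PySem.Dict.mk entry) "action" with
  | some s => if s = "" then "unknown" else s
  | none => "unknown"

-- ===== PORT A =====
def infer_single_failed_action_py (entries : Option (List (List (String × String)))) : Option String :=
  let actions : PySem.Set String := PySem.Set.ofList ((entries.getD []).map pvAct)
  if PySem.Set.len actions = 1 then PySem.List.pyGet? actions 0 else none

-- ===== PORT B =====
def pvLoopB : Option String → List (List (String × String)) → Option String
  | candidate, [] => candidate
  | candidate, entry :: rest =>
    let act := pvAct entry
    match candidate with
    | none => pvLoopB (some act) rest
    | some c => if act ≠ c then none else pvLoopB (some c) rest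

def infer_single_failed_action_py_alt (entries : Option (List (List (String × String)))) : Option String :=
  pvLoopB none (entries.getD [])

-- ===== PRECONDITION & SPEC =====
def Spec_infer_single_failed_action_py (entries : Option (List (List (String × String)))) (out : Option String) : Prop := out = infer_single_failed_action_py_alt entries
instance (entries : Option (List (List (String × String)))) (out : Option String) : Decidable (Spec_infer_single_failed_action_py entries out) := by unfold Spec_infer_single_failed_action_py; infer_instance

-- ===== CLAIM (what is proved, stated in full; the proofs are below) =====
def Claim_equal_infer_single_failed_action_py : Prop := ∀ (entries : Option (List (List (String × String)))), Dom_infer_single_failed_action_py entries → Spec_infer_single_failed_action_py entries (infer_single_failed_action_py entries)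

-- ===== LEMMAS AND PROOFS =====

-- B's loop with a fixed candidate c: keeps c iff every remaining action equals c
theorem pvLoopB_some (c : String) (l : List (List (String × String))) :
    pvLoopB (some c) l = if ∀ e ∈ l, pvAct e = c then some c else none := by
  induction l with
  | nil => simp [pvLoopB]
  | cons e t ih =>
    simp only [pvLoopB, ih]
    by_cases h : pvAct e = c <;> simp [h]

-- A's set stays the singleton [c] while all actions equal c
theorem foldl_add_const (c : String) (l : List String) (s : PySem.Set String) (hc : c ∈ s)
    (h : ∀ x ∈ l, x = c) : l.foldl PySem.Set.add s = s := by
  induction l with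
  | nil => rfl
  | cons x t ih =>
    have hx : x = c := h x (by simp)
    subst hx
    simp only [List.foldl_cons, PySem.Set.add_of_mem hc]
    exact ih (fun y hy => h y (by simp [hy]))

theorem key (l : List (List (String × String))) :
    (if PySem.Set.len (PySem.Set.ofList (l.map pvAct)) = 1
      then PySem.List.pyGet? (PySem.Set.ofList (l.map pvAct)) 0 else none)
    = pvLoopB none l := by
  cases l with
  | nil => simp [PySem.Set.ofList, PySem.Set.len, pvLoopB]
  | cons e t =>
    simp only [List.map_cons, pvLoopB, pvLoopB_some]
    by_cases h : ∀ x ∈ t, pvAct x = pvAct e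
    · have : PySem.Set.ofList (pvAct e :: t.map pvAct) = [pvAct e] := by
        rw [PySem.Set.ofList_eq_foldl]
        simp only [List.foldl_cons]
        have : PySem.Set.add [] (pvAct e) = [pvAct e] := rfl
        rw [this]
        exact foldl_add_const (pvAct e) _ _ (by simp)
          (by intro x hx; obtain ⟨y, hy, rfl⟩ := List.mem_map.mp hx; exact h y hy)
      rw [this, if_pos h]
      simp [PySem.Set.len]
    · have hne : (PySem.Set.ofList (pvAct e :: t.map pvAct)).length ≠ 1 := by
        push Not at h
        obtain ⟨x, hx, hxne⟩ := h
        intro hlen'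
        have hmem1 : pvAct e ∈ PySem.Set.ofList (pvAct e :: t.map pvAct) := by
          rw [PySem.Set.mem_ofList]; simp
        have hmem2 : pvAct x ∈ PySem.Set.ofList (pvAct e :: t.map pvAct) := by
          rw [PySem.Set.mem_ofList]; simp; right; exact ⟨x, hx, rfl⟩
        obtain ⟨y, hy⟩ := List.length_eq_one_iff.mp hlen'
        rw [hy] at hmem1 hmem2
        simp at hmem1 hmem2
        exact hxne (hmem2.trans hmem1.symm)
      rw [if_neg h]
      simp [PySem.Set.len, hne]

-- ===== VERDICT (by name: the statement is the Claim_ definition above) =====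
theorem infer_single_failed_action_py_spec : Claim_equal_infer_single_failed_action_py := by
  intro entries _
  unfold Spec_infer_single_failed_action_py infer_single_failed_action_py infer_single_failed_action_py_alt
  exact key (entries.getD [])
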